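-- pv_equiv track=rewrite | github.com/hdkslax/readShowImage | Q3/Q3.py | higher_color_saturation
-- ===== SOURCE A (Python) =====
-- def higher_color_saturation(pixel):
--     higher_saturation_pixel = [[0 for i in range(3)] for j in range(len(pixel))]
--     for i in range(len(pixel)):
--         if pixel[i][0] == max(pixel[i]):
--             higher_saturation_pixel[i][0] = pixel[i][0] + 20
--             if higher_saturation_pixel[i][0] > 255:
--                 higher_saturation_pixel[i][0] = 255
--             higher_saturation_pixel[i][1] = pixel[i][1]
--             higher_saturation_pixel[i][2] = pixel[i][2]
--         elif pixel[i][1] == max(pixel[i]):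
--             higher_saturation_pixel[i][1] = pixel[i][1] + 20
--             if higher_saturation_pixel[i][1] > 255:
--                 higher_saturation_pixel[i][1] = 255
--             higher_saturation_pixel[i][0] = pixel[i][0]
--             higher_saturation_pixel[i][2] = pixel[i][2]
--         else:
--             higher_saturation_pixel[i][2] = pixel[i][2] + 20
--             if higher_saturation_pixel[i][2] > 255:
--                 higher_saturation_pixel[i][2] = 255
--             higher_saturation_pixel[i][0] = pixel[i][0]
--             higher_saturation_pixel[i][1] = pixel[i][1]
--
--         if pixel[i][0] == min(pixel[i]):
--             higher_saturation_pixel[i][0] = pixel[i][0] - 20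
--             if higher_saturation_pixel[i][0] < 0:
--                 higher_saturation_pixel[i][0] = 0
--             higher_saturation_pixel[i][1] = pixel[i][1]
--             higher_saturation_pixel[i][2] = pixel[i][2]
--         elif pixel[i][1] == min(pixel[i]):
--             higher_saturation_pixel[i][1] = pixel[i][1] - 20
--             if higher_saturation_pixel[i][1] < 0:
--                 higher_saturation_pixel[i][1] = 0
--             higher_saturation_pixel[i][0] = pixel[i][0]
--             higher_saturation_pixel[i][2] = pixel[i][2]
--         else:
--             higher_saturation_pixel[i][2] = pixel[i][2] - 20
--             if higher_saturation_pixel[i][2] < 0: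
--                 higher_saturation_pixel[i][2] = 0
--             higher_saturation_pixel[i][0] = pixel[i][0]
--             higher_saturation_pixel[i][1] = pixel[i][1]
--
--     return higher_saturation_pixel
-- ===== SOURCE B (Python) =====
-- def higher_color_saturation(pixel):
--     # Column-major staged rewrite: split into three channel columns, mark each
--     # pixel's min channel (priority 0,1,2), lower only the marked column entries,
--     # then zip the columns back into rows. A's max-boost block is dead code.
--     cols = [[p[j] for p in pixel] for j in range(3)]
--     ks = [0 if p[0] == min(p) else (1 if p[1] == min(p) else 2) for p in pixel]
--     new_cols = [[max(v - 20, 0) if k == j else v for k, v in zip(ks, cols[j])]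
--                 for j in range(3)]
--     return [list(row) for row in zip(new_cols[0], new_cols[1], new_cols[2])]
-- ===== Notes on version B (the rewrite author's own statement) =====
-- stated objective: alternative
-- what changed: B replaces A's row-by-row double-block state machine by a column-major staged pipeline: it splits the pixels into three channel columns, computes each pixel's min-channel index (priority 0,1,2) in a separate pass, lowers only the marked entries of each column (clamped at 0), and zips the columns back into rows; A's entire max-boost block is dead code (overwritten by the min block) and is dropped.
-- outside the precondition, e.g. on higher_color_saturation([[5, 7]]): A raises IndexError, B raises IndexError
import Mathlib
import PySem

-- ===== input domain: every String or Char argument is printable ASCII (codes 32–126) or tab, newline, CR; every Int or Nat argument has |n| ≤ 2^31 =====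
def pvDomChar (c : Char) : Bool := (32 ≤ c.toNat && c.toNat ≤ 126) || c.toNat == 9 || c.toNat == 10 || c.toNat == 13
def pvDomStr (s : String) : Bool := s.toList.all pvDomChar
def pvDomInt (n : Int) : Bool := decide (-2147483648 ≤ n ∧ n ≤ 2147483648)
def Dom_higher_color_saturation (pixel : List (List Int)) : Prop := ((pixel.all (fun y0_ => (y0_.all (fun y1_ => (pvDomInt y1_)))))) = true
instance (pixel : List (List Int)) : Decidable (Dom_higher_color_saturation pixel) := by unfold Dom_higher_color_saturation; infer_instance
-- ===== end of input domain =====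

-- B drops A's dead max-boost block and works column-major in stages: split into three
-- channel columns, mark each pixel's min channel, lower the marked entries, zip back.

-- ===== PORT A =====
-- one iteration of A's loop: both blocks in statement order; the row state starts (0,0,0)
def pvARow (p : List Int) : List Int :=
  let mx := (PySem.List.max? p (fun y => y)).getD 0
  let mn := (PySem.List.min? p (fun y => y)).getD 0
  -- first block (max boost)
  let s1 : Int × Int × Int :=
    if PySem.List.pyGetD p 0 0 = mx then
      let a := PySem.List.pyGetD p 0 0 + 20
      let a := if a > 255 then 255 else a
      (a, PySem.List.pyGetD p 1 0, PySem.List.pyGetD p 2 0)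
    else if PySem.List.pyGetD p 1 0 = mx then
      let a := PySem.List.pyGetD p 1 0 + 20
      let a := if a > 255 then 255 else a
      (PySem.List.pyGetD p 0 0, a, PySem.List.pyGetD p 2 0)
    else
      let a := PySem.List.pyGetD p 2 0 + 20
      let a := if a > 255 then 255 else a
      (PySem.List.pyGetD p 0 0, PySem.List.pyGetD p 1 0, a)
  -- second block (min lowering): every field of the row is written again
  let s2 : Int × Int × Int :=
    if PySem.List.pyGetD p 0 0 = mn then
      let a := PySem.List.pyGetD p 0 0 - 20
      let a := if a < 0 then 0 else a
      (a, PySem.List.pyGetD p 1 0, PySem.List.pyGetD p 2 0)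
    else if PySem.List.pyGetD p 1 0 = mn then
      let a := PySem.List.pyGetD p 1 0 - 20
      let a := if a < 0 then 0 else a
      (PySem.List.pyGetD p 0 0, a, PySem.List.pyGetD p 2 0)
    else
      let a := PySem.List.pyGetD p 2 0 - 20
      let a := if a < 0 then 0 else a
      (PySem.List.pyGetD p 0 0, PySem.List.pyGetD p 1 0, a)
  let _ := s1
  [s2.1, s2.2.1, s2.2.2]

def higher_color_saturation (pixel : List (List Int)) : List (List Int) :=
  pixel.map pvARow

-- ===== PORT B =====
-- stage 1: the three channel columns
def pvCol (pixel : List (List Int)) (j : Int) : List Int :=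
  pixel.map (fun p => PySem.List.pyGetD p j 0)
-- stage 2: index of each pixel's min channel (priority 0,1,2)
def pvKs (pixel : List (List Int)) : List Int :=
  pixel.map (fun p =>
    let m := (PySem.List.min? p (fun y => y)).getD 0
    if PySem.List.pyGetD p 0 0 = m then 0
    else if PySem.List.pyGetD p 1 0 = m then 1 else 2)
-- stage 3: lower the marked entries of column j
def pvLower (ks : List Int) (j : Int) (col : List Int) : List Int :=
  (ks.zip col).map (fun kv => if kv.1 = j then max (kv.2 - 20) 0 else kv.2)

def higher_color_saturation_alt (pixel : List (List Int)) : List (List Int) :=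
  let ks := pvKs pixel
  let n0 := pvLower ks 0 (pvCol pixel 0)
  let n1 := pvLower ks 1 (pvCol pixel 1)
  let n2 := pvLower ks 2 (pvCol pixel 2)
  (n0.zip (n1.zip n2)).map (fun t => [t.1, t.2.1, t.2.2])

-- ===== PRECONDITION & SPEC =====
-- A indexes pixel[i][0..2] (and min/max of each row): it raises IndexError on any row
-- with fewer than 3 channels, so exactly those inputs are excluded.
def Pre_higher_color_saturation (pixel : List (List Int)) : Prop :=
  ∀ p ∈ pixel, 3 ≤ p.length
instance (pixel : List (List Int)) : Decidable (Pre_higher_color_saturation pixel) := by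
  unfold Pre_higher_color_saturation; infer_instance
def pvWitness_higher_color_saturation : List (List Int) := [[100, 50, 200], [0, 0, 0]]

def Spec_higher_color_saturation (pixel : List (List Int)) (out : List (List Int)) : Prop := out = higher_color_saturation_alt pixel
instance (pixel : List (List Int)) (out : List (List Int)) : Decidable (Spec_higher_color_saturation pixel out) := by unfold Spec_higher_color_saturation; infer_instance

-- ===== CLAIM (what is proved, stated in full; the proofs are below) =====
def Claim_equal_higher_color_saturation : Prop := ∀ (pixel : List (List Int)), Dom_higher_color_saturation pixel → Pre_higher_color_saturation pixel → Spec_higher_color_saturation pixel (higher_color_saturation pixel)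

-- ===== LEMMAS AND PROOFS =====
-- head row of B equals A's row, for a row with ≥ 3 channels
theorem pvRow_eq (p : List Int) (h : 3 ≤ p.length) :
    (let m := (PySem.List.min? p (fun y => y)).getD 0
     let k : Int := if PySem.List.pyGetD p 0 0 = m then 0
                    else if PySem.List.pyGetD p 1 0 = m then 1 else 2
     [if k = 0 then max (PySem.List.pyGetD p 0 0 - 20) 0 else PySem.List.pyGetD p 0 0,
      if k = 1 then max (PySem.List.pyGetD p 1 0 - 20) 0 else PySem.List.pyGetD p 1 0,
      if k = 2 then max (PySem.List.pyGetD p 2 0 - 20) 0 else PySem.List.pyGetD p 2 0])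
    = pvARow p := by
  obtain ⟨a, b, c, t, rfl⟩ : ∃ a b c t, p = a :: b :: c :: t := by
    match p, h with | a :: b :: c :: t, _ => exact ⟨a, b, c, t, rfl⟩
  simp only [pvARow, PySem.List.pyGetD_zero_cons]
  have h1 : PySem.List.pyGetD (a :: b :: c :: t) 1 0 = b := by
    simp [PySem.List.pyGetD, PySem.List.pyGet?, PySem.List.pyIdx?]
    rw [if_pos (by omega)]; rfl
  have h2 : PySem.List.pyGetD (a :: b :: c :: t) 2 0 = c := by
    simp [PySem.List.pyGetD, PySem.List.pyGet?, PySem.List.pyIdx?]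
    rw [if_pos (by omega)]; rfl
  simp only [h1, h2]
  split_ifs with hm1 hm2 <;> simp <;> omega

theorem pv_eq (pixel : List (List Int)) (hpre : ∀ p ∈ pixel, 3 ≤ p.length) :
    higher_color_saturation pixel = higher_color_saturation_alt pixel := by
  induction pixel with
  | nil => rfl
  | cons p rest ih =>
    have hp := hpre p (List.mem_cons_self ..)
    have ih' := ih (fun q hq => hpre q (List.mem_cons_of_mem _ hq))
    simp only [higher_color_saturation, higher_color_saturation_alt, pvKs, pvCol, pvLower,
      List.map_cons, List.zip_cons_cons] at ih' ⊢
    refine congrArg₂ _ ?_ ih'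
    simpa using (pvRow_eq p hp).symm

theorem higher_color_saturation_spec : Claim_equal_higher_color_saturation := by
  intro pixel _ hpre
  exact pv_eq pixel hpre
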